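-- pv_equiv track=rewrite | github.com/sakshi2k/_python_challenges | prime_twins.py | prime_triplets
-- ===== SOURCE A (Python) =====
-- def is_prime_number(n: int) -> bool:
--     if n == 0 or n == 1:
--         return False
--     if (n <= 3):
--         return True
--     for i in range(2, (n // 2) + 1):
--         if (n % i == 0):
--             return False
--         i += 1
--     return True
--
-- def prime_triplets(n: int) -> list[tuple[int, int, int]]:
--     """Returns the first n prime triplets."""
--     i = 3
--     result_list: list[tuple] = []
--     while (result_list.__len__() < n):
--         if is_prime_number(i) and is_prime_number(i + 6):
--             x = 0
--             if (is_prime_number(i + 2)):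
--                 x = i + 2
--             elif (is_prime_number(i + 4)):
--                 x = i + 4
--
--             if x != 0:
--                 result_list.append((i, x, i + 6))
--
--         i += 1
--
--     return result_list
-- ===== SOURCE B (Python) =====
-- def _is_prime(m: int) -> bool:
--     if m < 2:
--         return False
--     if m < 4:
--         return True
--     if m % 2 == 0:
--         return False
--     d = 3
--     while d * d <= m:
--         if m % d == 0:
--             return False
--         d += 2
--     return True
--
-- def prime_triplets(n: int) -> list[tuple[int, int, int]]:
--     """Returns the first n prime triplets."""
--     result: list[tuple[int, int, int]] = []
--     primes: set[int] = set()
--     q = 2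
--     while len(result) < n:
--         if _is_prime(q):
--             primes.add(q)
--             p = q - 6
--             if p in primes and (p + 2 in primes or p + 4 in primes):
--                 x = p + 2 if p + 2 in primes else p + 4
--                 result.append((p, x, q))
--         q += 1
--     return result
-- ===== Notes on version B (the rewrite author's own statement) =====
-- stated objective: faster
-- what changed: Primality now trial-divides only odd divisors up to the square root instead of every integer up to half the argument, and the four primality tests per candidate are replaced by one primality test per integer plus lookups in the growing set of primes already found.
import Mathlib
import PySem

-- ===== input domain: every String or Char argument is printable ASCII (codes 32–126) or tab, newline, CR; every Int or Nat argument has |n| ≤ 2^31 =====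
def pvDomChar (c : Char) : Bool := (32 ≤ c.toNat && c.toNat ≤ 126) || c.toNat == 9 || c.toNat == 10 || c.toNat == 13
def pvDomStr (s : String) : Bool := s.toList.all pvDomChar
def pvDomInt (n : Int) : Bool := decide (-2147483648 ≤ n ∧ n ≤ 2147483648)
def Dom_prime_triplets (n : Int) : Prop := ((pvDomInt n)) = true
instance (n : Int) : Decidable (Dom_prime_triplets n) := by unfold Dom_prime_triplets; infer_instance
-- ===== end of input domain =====

-- B replaces A's O(p) trial division to p/2 and four primality tests per candidate by one
-- √p trial division per integer plus set lookups in the set of primes seen so far (objective: faster).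
-- Both Python loops are unbounded searches, so both ports carry an explicit fuel constant
-- (a hundred million candidates; evaluation stops as soon as n triplets are found); the equivalence theorem
-- holds for EVERY n regardless of fuel, because the two fuels are aligned so both ports scan
-- exactly the same candidate range.

-- ===== PORT A =====
-- is_prime_number: the early-return for-loop over range(2, n//2+1) is a pure test, ported as .all
def ptIsPrimeA (n : Int) : Bool :=
  if n == 0 || n == 1 then false
  else if n ≤ 3 then true
  else (PySem.List.pyRange 2 (PySem.Int.floordiv n 2 + 1) 1).all (fun i => !(PySem.Int.mod n i == 0))

-- the local variable x of A's loop body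
def ptXA (i : Int) : Int :=
  if ptIsPrimeA (i + 2) then i + 2 else if ptIsPrimeA (i + 4) then i + 4 else 0

-- the 'while len(result_list) < n' loop of A (fuel = candidate bases still to scan)
def ptLoopA : Nat → Int → List (Int × Int × Int) → Int → List (Int × Int × Int)
  | 0, _, acc, _ => acc
  | Nat.succ f, i, acc, n =>
    if (acc.length : Int) < n then
      if ptIsPrimeA i && ptIsPrimeA (i + 6) then
        if ptXA i ≠ 0 then ptLoopA f (i + 1) (acc ++ [(i, ptXA i, i + 6)]) n
        else ptLoopA f (i + 1) acc n
      else ptLoopA f (i + 1) acc n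
    else acc

def prime_triplets (n : Int) : List (Int × Int × Int) := ptLoopA 100000000 3 [] n

-- ===== PORT B =====
-- the 'while d*d <= m' trial loop of _is_prime; fuel m.toNat is ample since d grows by 2 per step
def ptTrialB : Nat → Int → Int → Bool
  | 0, _, _ => true
  | Nat.succ f, m, d =>
    if d * d ≤ m then
      if PySem.Int.mod m d == 0 then false else ptTrialB f m (d + 2)
    else true

def ptIsPrimeB (m : Int) : Bool :=
  if m < 2 then false
  else if m < 4 then true
  else if PySem.Int.mod m 2 == 0 then false
  else ptTrialB m.toNat m 3

-- the local variable x of B's loop body (s = the prime set after adding q, p = q - 6)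
def ptXB (s : PySem.Set Int) (p : Int) : Int :=
  if PySem.Set.contains s (p + 2) then p + 2 else p + 4

-- the 'while len(result) < n' loop of B (fuel = candidates still to scan; seven more than A's
-- because B's scan starts one below A's first base and records a triplet only at its LAST member)
def ptLoopB : Nat → Int → PySem.Set Int → List (Int × Int × Int) → Int → List (Int × Int × Int)
  | 0, _, _, res, _ => res
  | Nat.succ f, q, primes, res, n =>
    if (res.length : Int) < n then
      if ptIsPrimeB q then
        if PySem.Set.contains (PySem.Set.add primes q) (q - 6) &&
           (PySem.Set.contains (PySem.Set.add primes q) (q - 6 + 2) ||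
            PySem.Set.contains (PySem.Set.add primes q) (q - 6 + 4)) then
          ptLoopB f (q + 1) (PySem.Set.add primes q)
            (res ++ [(q - 6, ptXB (PySem.Set.add primes q) (q - 6), q)]) n
        else ptLoopB f (q + 1) (PySem.Set.add primes q) res n
      else ptLoopB f (q + 1) primes res n
    else res

def prime_triplets_alt (n : Int) : List (Int × Int × Int) := ptLoopB 100000007 2 PySem.Set.empty [] n

-- ===== PRECONDITION & SPEC =====
def Spec_prime_triplets (n : Int) (out : List (Int × Int × Int)) : Prop := out = prime_triplets_alt n
instance (n : Int) (out : List (Int × Int × Int)) : Decidable (Spec_prime_triplets n out) := by unfold Spec_prime_triplets; infer_instance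

-- ===== CLAIM (what is proved, stated in full; the proofs are below) =====
def Claim_equal_prime_triplets : Prop := ∀ (n : Int), Dom_prime_triplets n → Spec_prime_triplets n (prime_triplets n)

-- ===== LEMMAS AND PROOFS =====

-- the triplet condition and the recorded triple, both phrased with B's primality test
def ptCond (p : Int) : Bool :=
  ptIsPrimeB p && ptIsPrimeB (p + 6) && (ptIsPrimeB (p + 2) || ptIsPrimeB (p + 4))

def ptTrip (p : Int) : Int × Int × Int :=
  (p, if ptIsPrimeB (p + 2) then p + 2 else p + 4, p + 6)

-- the stream of triplets with base in [i, i+f)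
def ptTL (i : Int) : Nat → List (Int × Int × Int)
  | 0 => []
  | f + 1 => (if ptCond i then [ptTrip i] else []) ++ ptTL (i + 1) f

theorem ptIsPrimeB_of_lt_two {m : Int} (h : m < 2) : ptIsPrimeB m = false := by
  unfold ptIsPrimeB
  rw [if_pos h]

-- ptTrialB decides "no divisor of m in {d, d+2, d+4, …} with square ≤ m", given enough fuel
theorem ptTrialB_spec (f : Nat) : ∀ (m d : Int), 0 < d → m < d + 2 * f →
    (ptTrialB f m d = true ↔
      ∀ e : Int, (∃ j : Nat, e = d + 2 * j) → e * e ≤ m → ¬ e ∣ m) := by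
  induction f with
  | zero =>
    intro m d hd hm
    rw [ptTrialB]
    simp only [true_iff]
    rintro e ⟨j, rfl⟩ he
    exfalso
    push_cast at hm
    have h1 : (0:Int) ≤ (j : Int) := by positivity
    have hx : (1:Int) ≤ d + 2 * (j : Int) := by omega
    nlinarith
  | succ f ih =>
    intro m d hd hm
    rw [ptTrialB]
    by_cases hdd : d * d ≤ m
    · rw [if_pos hdd]
      by_cases hdvd : d ∣ m
      · have hmod : PySem.Int.mod m d = 0 := (PySem.Int.mod_eq_zero_iff_dvd m d).mpr hdvd
        simp only [hmod, beq_self_eq_true, if_true, Bool.false_eq_true, false_iff]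
        intro hcon
        exact hcon d ⟨0, by push_cast; ring⟩ hdd hdvd
      · have hbeq : (PySem.Int.mod m d == 0) = false := by
          simp only [beq_eq_false_iff_ne, ne_eq]
          intro h
          exact hdvd ((PySem.Int.mod_eq_zero_iff_dvd m d).mp h)
        rw [hbeq]
        simp only [Bool.false_eq_true, if_false]
        rw [ih m (d + 2) (by omega) (by push_cast; push_cast at hm; omega)]
        constructor
        · rintro h e ⟨j, rfl⟩ he hdv
          cases j with
          | zero => exact hdvd (by simpa using hdv)
          | succ j' =>
            exact h (d + 2 * ((j' : Nat) + 1 : Nat)) ⟨j', by push_cast; ring⟩ he hdv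
        · rintro h e ⟨j, rfl⟩ he hdv
          exact h (d + 2 + 2 * (j : Nat)) ⟨j + 1, by push_cast; ring⟩ he hdv
    · rw [if_neg hdd]
      simp only [true_iff]
      rintro e ⟨j, rfl⟩ he
      exfalso
      have h1 : (0:Int) ≤ (j : Int) := by positivity
      nlinarith
-- B's primality test decides Nat.Prime m.toNat for m ≥ 2
theorem ptIsPrimeB_iff (m : Int) (h2 : 2 ≤ m) : ptIsPrimeB m = true ↔ Nat.Prime m.toNat := by
  by_cases h4 : m < 4
  · interval_cases m <;> decide
  · push_neg at h4
    have hklt : ¬ m < 2 := by omega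
    have hklt4 : ¬ m < 4 := by omega
    rw [ptIsPrimeB, if_neg hklt, if_neg hklt4]
    by_cases heven : PySem.Int.mod m 2 = 0
    · have hdvd2 : (2:Int) ∣ m := (PySem.Int.mod_eq_zero_iff_dvd m 2).mp heven
      have hk : (2:Nat) ∣ m.toNat := by
        have hm : ((m.toNat : Int)) = m := Int.toNat_of_nonneg (by omega)
        exact_mod_cast hm ▸ hdvd2
      simp only [heven, beq_self_eq_true, if_true, Bool.false_eq_true, false_iff]
      intro hp
      rcases (Nat.dvd_prime hp).mp hk with h | h <;> omega
    · have hbeq : (PySem.Int.mod m 2 == 0) = false := by simpa using heven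
      rw [hbeq]
      simp only [Bool.false_eq_true, if_false]
      have hodd : ¬ (2:Int) ∣ m := fun hd =>
        heven ((PySem.Int.mod_eq_zero_iff_dvd m 2).mpr hd)
      rw [ptTrialB_spec m.toNat m 3 (by omega) (by omega)]
      constructor
      · intro h
        by_contra hnp
        set k := m.toNat with hk
        have hmk : ((k : Int)) = m := Int.toNat_of_nonneg (by omega)
        have hd := Nat.minFac_dvd k
        have hdp := Nat.minFac_prime (show k ≠ 1 by omega)
        have hsq : k.minFac * k.minFac ≤ k := by
          have := Nat.minFac_sq_le_self (by omega) hnp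
          nlinarith [this]
        have h2le : 2 ≤ k.minFac := hdp.two_le
        have hne2 : k.minFac ≠ 2 := by
          intro he
          exact hodd (by exact_mod_cast hmk ▸ (Int.natCast_dvd_natCast.mpr (he ▸ hd)))
        have hfodd : k.minFac % 2 = 1 := by
          rcases Nat.mod_two_eq_zero_or_one k.minFac with h0 | h1
          · exfalso
            have h2f : (2:Nat) ∣ k.minFac := Nat.dvd_of_mod_eq_zero h0
            have h2k : (2:Nat) ∣ k := h2f.trans hd
            exact hodd (by exact_mod_cast hmk ▸ (Int.natCast_dvd_natCast.mpr h2k))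
          · exact h1
        have h3le : 3 ≤ k.minFac := by omega
        refine h (k.minFac : Int) ⟨(k.minFac - 3) / 2, by push_cast; omega⟩ ?_ ?_
        · rw [← hmk]; exact_mod_cast hsq
        · rw [← hmk]; exact_mod_cast hd
      · rintro hp e ⟨j, hj⟩ he hdvd
        have he3 : 3 ≤ e := by omega
        have hmk : ((m.toNat : Int)) = m := Int.toNat_of_nonneg (by omega)
        have hek : ((e.toNat : Int)) = e := Int.toNat_of_nonneg (by omega)
        have hdk : e.toNat ∣ m.toNat := by
          rw [← Int.natCast_dvd_natCast, hek, hmk]; exact hdvd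
        rcases (Nat.dvd_prime hp).mp hdk with h1 | h1
        · omega
        · have hem : e = m := by omega
          nlinarith

-- A's primality test decides Nat.Prime m.toNat for m ≥ 2
theorem ptIsPrimeA_iff (m : Int) (h2 : 2 ≤ m) : ptIsPrimeA m = true ↔ Nat.Prime m.toNat := by
  by_cases h4 : m < 4
  · interval_cases m <;> decide
  · push_neg at h4
    have hb1 : (m == 0 || m == 1) = false := by simp; omega
    have hb2 : ¬ m ≤ 3 := by omega
    rw [ptIsPrimeA, hb1, if_neg (by simp : ¬ ((false : Bool) = true)), if_neg hb2]
    rw [PySem.Int.floordiv_eq_ediv_of_pos (by norm_num)]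
    rw [List.all_eq_true]
    constructor
    · intro h
      by_contra hnp
      set k := m.toNat with hk
      have hmk : ((k : Int)) = m := Int.toNat_of_nonneg (by omega)
      have hd := Nat.minFac_dvd k
      have hdp := Nat.minFac_prime (show k ≠ 1 by omega)
      have hsq : k.minFac * k.minFac ≤ k := by
        have := Nat.minFac_sq_le_self (by omega) hnp
        nlinarith [this]
      have h2le : 2 ≤ k.minFac := hdp.two_le
      have h2d : 2 * (k.minFac : Int) ≤ m := by
        rw [← hmk]
        exact_mod_cast le_trans (by nlinarith) hsq
      have hmem : ((k.minFac : Int)) ∈ PySem.List.pyRange 2 (m / 2 + 1) 1 := by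
        rw [PySem.List.mem_pyRange_one]
        constructor
        · exact_mod_cast h2le
        · omega
      have hfalse := h _ hmem
      simp only [Bool.not_eq_eq_eq_not, Bool.not_true, beq_eq_false_iff_ne, ne_eq] at hfalse
      exact hfalse ((PySem.Int.mod_eq_zero_iff_dvd m _).mpr
        (by rw [← hmk]; exact_mod_cast hd))
    · intro hp i hmem
      rw [PySem.List.mem_pyRange_one] at hmem
      simp only [Bool.not_eq_eq_eq_not, Bool.not_true, beq_eq_false_iff_ne, ne_eq]
      intro hmod
      have hdvd : i ∣ m := (PySem.Int.mod_eq_zero_iff_dvd m i).mp hmod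
      have hmk : ((m.toNat : Int)) = m := Int.toNat_of_nonneg (by omega)
      have hik : ((i.toNat : Int)) = i := Int.toNat_of_nonneg (by omega)
      have hdk : i.toNat ∣ m.toNat := by
        rw [← Int.natCast_dvd_natCast, hik, hmk]; exact hdvd
      rcases (Nat.dvd_prime hp).mp hdk with h1 | h1 <;> omega

theorem ptIsPrimeA_eq_ptIsPrimeB (m : Int) (h : 2 ≤ m) : ptIsPrimeA m = ptIsPrimeB m :=
  Bool.eq_iff_iff.mpr ((ptIsPrimeA_iff m h).trans (ptIsPrimeB_iff m h).symm)

-- splitting off the head of a take over a cons, counting with Int lengths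
theorem ptTakeCons {α : Type} (a : α) (l : List α) (n : Int) (len : Nat) (h : (len : Int) < n) :
    (a :: l).take (n - (len : Int)).toNat = a :: l.take (n - ((len : Int) + 1)).toNat := by
  obtain ⟨k, hk⟩ : ∃ k, (n - (len : Int)).toNat = k + 1 :=
    ⟨(n - ((len : Int) + 1)).toNat, by omega⟩
  rw [hk, List.take_succ_cons]
  have hke : (n - ((len : Int) + 1)).toNat = k := by omega
  rw [hke]

-- A's loop returns the accumulator followed by the next (n - len acc) triplets with base ≥ i
theorem ptLoopA_char (f : Nat) : ∀ (i : Int) (acc : List (Int × Int × Int)) (n : Int), 3 ≤ i →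
    ptLoopA f i acc n = acc ++ (ptTL i f).take (n - (acc.length : Int)).toNat := by
  induction f with
  | zero => intro i acc n _; simp [ptLoopA, ptTL]
  | succ f ih =>
    intro i acc n hi
    rw [ptLoopA]
    by_cases hlen : (acc.length : Int) < n
    · rw [if_pos hlen]
      have e0 : ptIsPrimeA i = ptIsPrimeB i := ptIsPrimeA_eq_ptIsPrimeB i (by omega)
      have e2 : ptIsPrimeA (i + 2) = ptIsPrimeB (i + 2) := ptIsPrimeA_eq_ptIsPrimeB _ (by omega)
      have e4 : ptIsPrimeA (i + 4) = ptIsPrimeB (i + 4) := ptIsPrimeA_eq_ptIsPrimeB _ (by omega)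
      have e6 : ptIsPrimeA (i + 6) = ptIsPrimeB (i + 6) := ptIsPrimeA_eq_ptIsPrimeB _ (by omega)
      rw [show ptTL i (f + 1) = (if ptCond i then [ptTrip i] else []) ++ ptTL (i + 1) f from rfl]
      by_cases h06 : (ptIsPrimeB i && ptIsPrimeB (i + 6)) = true
      · rw [if_pos (by rw [e0, e6]; exact h06)]
        by_cases h24 : (ptIsPrimeB (i + 2) || ptIsPrimeB (i + 4)) = true
        · have hcond : ptCond i = true := by
            unfold ptCond; rw [h06, Bool.true_and, h24]
          have hp4' : ptIsPrimeB (i + 2) = false → ptIsPrimeB (i + 4) = true := by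
            intro hp2
            rcases Bool.or_eq_true_iff.mp h24 with h | h
            · rw [hp2] at h; cases h
            · exact h
          have hxne : ptXA i ≠ 0 := by
            unfold ptXA
            rw [e2, e4]
            by_cases hp2 : ptIsPrimeB (i + 2) = true
            · rw [if_pos hp2]; omega
            · rw [if_neg hp2, if_pos (hp4' (Bool.eq_false_iff.mpr hp2))]; omega
          rw [if_pos hxne, ih (i + 1) _ n (by omega)]
          have htrip : (i, ptXA i, i + 6) = ptTrip i := by
            unfold ptXA ptTrip
            rw [e2, e4]
            by_cases hp2 : ptIsPrimeB (i + 2) = true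
            · rw [if_pos hp2, if_pos hp2]
            · rw [if_neg hp2, if_neg hp2, if_pos (hp4' (Bool.eq_false_iff.mpr hp2))]
          rw [htrip, hcond]
          simp only [if_true, List.length_append, List.length_cons, List.length_nil,
            List.singleton_append]
          rw [ptTakeCons (ptTrip i) _ n acc.length hlen]
          push_cast
          rw [List.append_assoc, List.singleton_append]
        · have hcond : ptCond i = false := by
            unfold ptCond
            rcases Bool.or_eq_false_iff.mp (Bool.eq_false_iff.mpr h24) with ⟨hh2, hh4⟩
            rw [hh2, hh4]
            simp
          have hx0 : ptXA i = 0 := by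
            unfold ptXA
            rcases Bool.or_eq_false_iff.mp (Bool.eq_false_iff.mpr h24) with ⟨hh2, hh4⟩
            rw [e2, e4, hh2, hh4]
            simp
          rw [if_neg (by rw [hx0]; simp), ih (i + 1) acc n (by omega), hcond]
          simp
      · rw [if_neg (by rw [e0, e6]; exact h06)]
        have hcond : ptCond i = false := by
          unfold ptCond
          rw [Bool.eq_false_iff.mpr h06, Bool.false_and]
        rw [ih (i + 1) acc n (by omega), hcond]
        simp
    · rw [if_neg hlen]
      have h0 : (n - (acc.length : Int)).toNat = 0 := by omega
      simp [h0]

-- B's loop: given that 'primes' holds exactly the primes below q, it returns the accumulator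
-- followed by the next (n - len res) triplets with base ≥ q - 6
theorem ptLoopB_char (f : Nat) : ∀ (q : Int) (primes : PySem.Set Int)
    (res : List (Int × Int × Int)) (n : Int),
    (∀ y : Int, PySem.Set.contains primes y = (ptIsPrimeB y && decide (y < q))) →
    ptLoopB f q primes res n = res ++ (ptTL (q - 6) f).take (n - (res.length : Int)).toNat := by
  induction f with
  | zero => intro q primes res n _; simp [ptLoopB, ptTL]
  | succ f ih =>
    intro q primes res n hinv
    rw [ptLoopB]
    by_cases hlen : (res.length : Int) < n
    · rw [if_pos hlen]
      rw [show ptTL (q - 6) (f + 1) =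
            (if ptCond (q - 6) then [ptTrip (q - 6)] else []) ++ ptTL (q - 6 + 1) f from rfl]
      by_cases hq : ptIsPrimeB q = true
      · rw [if_pos hq]
        have hinv' : ∀ y : Int, PySem.Set.contains (PySem.Set.add primes q) y =
            (ptIsPrimeB y && decide (y < q + 1)) := by
          intro y
          rw [Bool.eq_iff_iff, PySem.Set.contains_iff, PySem.Set.mem_add,
            ← PySem.Set.contains_iff, hinv]
          by_cases hyq : y = q
          · subst hyq
            simp [hq]
          · simp [hyq]
            cases hy : ptIsPrimeB y <;> simp <;> omega
        have c1 : PySem.Set.contains (PySem.Set.add primes q) (q - 6) = ptIsPrimeB (q - 6) := by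
          rw [hinv']
          cases hpb : ptIsPrimeB (q - 6) <;> simp <;> omega
        have c2 : PySem.Set.contains (PySem.Set.add primes q) (q - 6 + 2) =
            ptIsPrimeB (q - 6 + 2) := by
          rw [hinv']
          cases hpb : ptIsPrimeB (q - 6 + 2) <;> simp <;> omega
        have c3 : PySem.Set.contains (PySem.Set.add primes q) (q - 6 + 4) =
            ptIsPrimeB (q - 6 + 4) := by
          rw [hinv']
          cases hpb : ptIsPrimeB (q - 6 + 4) <;> simp <;> omega
        rw [c1, c2, c3]
        by_cases hc : (ptIsPrimeB (q - 6) &&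
            (ptIsPrimeB (q - 6 + 2) || ptIsPrimeB (q - 6 + 4))) = true
        · rw [if_pos hc, ih (q + 1) _ _ n hinv']
          have hcond : ptCond (q - 6) = true := by
            unfold ptCond
            rw [show q - 6 + 6 = q by ring, hq, Bool.and_true]
            exact hc
          have htrip : (q - 6, ptXB (PySem.Set.add primes q) (q - 6), q) = ptTrip (q - 6) := by
            unfold ptXB ptTrip
            rw [c2, show q - 6 + 6 = q by ring]
          rw [htrip, hcond]
          simp only [if_true, List.length_append, List.length_cons, List.length_nil,
            List.singleton_append]
          rw [ptTakeCons (ptTrip (q - 6)) _ n res.length hlen]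
          push_cast
          rw [List.append_assoc, List.singleton_append, show q - 6 + 1 = q + 1 - 6 by ring]
        · rw [if_neg hc, ih (q + 1) _ _ n hinv']
          have hcond : ptCond (q - 6) = false := by
            unfold ptCond
            rw [show q - 6 + 6 = q by ring, hq, Bool.and_true]
            exact Bool.eq_false_iff.mpr hc
          rw [hcond, show q - 6 + 1 = q + 1 - 6 by ring]
          simp
      · rw [if_neg hq]
        rw [Bool.not_eq_true] at hq
        have hinv' : ∀ y : Int, PySem.Set.contains primes y =
            (ptIsPrimeB y && decide (y < q + 1)) := by
          intro y
          rw [hinv, Bool.eq_iff_iff]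
          cases hy : ptIsPrimeB y
          · simp
          · have hyq : y ≠ q := fun h => by rw [h, hq] at hy; cases hy
            simp
            omega
        rw [ih (q + 1) primes res n hinv']
        have hcond : ptCond (q - 6) = false := by
          unfold ptCond
          rw [show q - 6 + 6 = q by ring, hq]
          simp
        rw [hcond, show q - 6 + 1 = q + 1 - 6 by ring]
        simp
    · rw [if_neg hlen]
      have h0 : (n - (res.length : Int)).toNat = 0 := by omega
      simp [h0]

-- the first 7 candidates of B's scan (bases -4 … 2) yield no triplet, so the streams align
theorem ptTL_align (f : Nat) : ptTL (-4) (f + 7) = ptTL 3 f := by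
  rw [show f + 7 = f + 1 + 1 + 1 + 1 + 1 + 1 + 1 by omega]
  norm_num [ptTL, show ptCond (-4) = false by decide, show ptCond (-3) = false by decide,
    show ptCond (-2) = false by decide, show ptCond (-1) = false by decide,
    show ptCond 0 = false by decide, show ptCond 1 = false by decide,
    show ptCond 2 = false by decide]

-- ===== VERDICT (by name: the statement is the Claim_ definition above) =====
theorem prime_triplets_spec : Claim_equal_prime_triplets := by
  intro n _
  unfold Spec_prime_triplets prime_triplets prime_triplets_alt
  have hinv0 : ∀ y : Int, PySem.Set.contains PySem.Set.empty y =
      (ptIsPrimeB y && decide (y < 2)) := by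
    intro y
    by_cases hy : y < 2
    · simp [PySem.Set.empty, ptIsPrimeB_of_lt_two hy]
    · simp [PySem.Set.empty, hy]
  rw [ptLoopA_char 100000000 3 [] n (by norm_num),
      ptLoopB_char 100000007 2 PySem.Set.empty [] n hinv0]
  rw [show (2 : Int) - 6 = -4 by norm_num, show (100000007 : Nat) = 100000000 + 7 from rfl,
      ptTL_align]
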